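-- pv_equiv track=rewrite | github.com/MrBrantCode/unitest_baseline | mut_generate/mist_train_taco/taco_7762/solution.py | count_reconnaissance_units
-- ===== SOURCE A (Python) =====
-- def count_reconnaissance_units(n, d, heights):
--     # Sort the heights to facilitate the comparison
--     sorted_heights = sorted(heights)
--
--     # Initialize the count of valid pairs
--     count = 0
--
--     # Iterate through each soldier and compare with subsequent soldiers
--     for i in range(n):
--         for j in range(i + 1, n):
--             if sorted_heights[j] - sorted_heights[i] <= d:
--                 count += 1
--             else:
--                 break
--
--     # Each valid pair (i, j) and (j, i) is counted, so multiply by 2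
--     return count * 2
-- ===== SOURCE B (Python) =====
-- from bisect import bisect_right
--
-- def count_reconnaissance_units(n, d, heights):
--     s = sorted(heights)
--     count = 0
--     for i in range(n):
--         # all valid partners of soldier i sit in one contiguous block just after i
--         count += bisect_right(s, s[i] + d, i + 1, n) - (i + 1)
--     return count * 2
-- ===== Notes on version B (the rewrite author's own statement) =====
-- stated objective: faster
-- what changed: The quadratic inner scan over all later soldiers is replaced by one binary search (bisect_right) per soldier on the sorted list, locating the end of the valid block directly.
-- outside the precondition, e.g. on count_reconnaissance_units(1, 0, []): A returns 0, B raises IndexError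
import Mathlib
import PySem

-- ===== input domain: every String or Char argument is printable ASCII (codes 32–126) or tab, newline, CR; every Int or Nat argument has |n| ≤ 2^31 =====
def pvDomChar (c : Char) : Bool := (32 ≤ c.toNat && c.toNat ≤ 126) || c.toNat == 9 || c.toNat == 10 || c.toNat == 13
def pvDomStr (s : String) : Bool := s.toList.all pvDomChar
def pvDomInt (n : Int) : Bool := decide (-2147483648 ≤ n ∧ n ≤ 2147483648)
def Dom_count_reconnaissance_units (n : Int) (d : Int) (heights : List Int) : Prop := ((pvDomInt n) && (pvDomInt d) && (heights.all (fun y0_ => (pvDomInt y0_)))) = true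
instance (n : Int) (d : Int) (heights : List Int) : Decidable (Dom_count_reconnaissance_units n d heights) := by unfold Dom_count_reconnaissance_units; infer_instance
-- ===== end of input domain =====

-- B replaces A's quadratic inner scan by one bisect_right binary search per soldier (faster, asymptotic).

-- ===== PORT A =====
-- inner 'for j in range(i+1, n): if s[j]-s[i] <= d: count += 1 else: break'
def pvInnerA (s : List Int) (d si : Int) (c : Int) : List Int → Int
  | [] => c
  | j :: rest =>
      if (PySem.List.pyGetD s j 0) - si ≤ d then pvInnerA s d si (c + 1) rest else c

def count_reconnaissance_units (n : Int) (d : Int) (heights : List Int) : Int :=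
  let sorted_heights := PySem.List.sorted heights id
  let count := (PySem.List.pyRange 0 n 1).foldl
    (fun c i => pvInnerA sorted_heights d (PySem.List.pyGetD sorted_heights i 0) c
                  (PySem.List.pyRange (i + 1) n 1)) 0
  count * 2

-- ===== PORT B =====
-- bisect.bisect_right(s, x, lo, hi): the search confined to the window [lo, hi) is
-- lo plus the search on the window slice (exact for every list, it inspects the same elements).
def pvBisectRightWin (s : List Int) (x lo hi : Int) : Int :=
  lo + (PySem.List.bisectRight (PySem.List.slice s (some lo) (some hi)) x : Int)

def count_reconnaissance_units_alt (n : Int) (d : Int) (heights : List Int) : Int :=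
  let s := PySem.List.sorted heights id
  let count := (PySem.List.pyRange 0 n 1).foldl
    (fun c i => c + (pvBisectRightWin s ((PySem.List.pyGetD s i 0) + d) (i + 1) n - (i + 1))) 0
  count * 2

-- ===== PRECONDITION & SPEC =====
-- Pre_ excludes exactly the inputs where an index reaches past the list: there A raises
-- IndexError (n ≥ 2) or, on the n = 1 > len corner A still returns 0 on, B itself raises.
def Pre_count_reconnaissance_units (n : Int) (d : Int) (heights : List Int) : Prop :=
  n ≤ heights.length ∨ n ≤ 0
instance (n : Int) (d : Int) (heights : List Int) : Decidable (Pre_count_reconnaissance_units n d heights) := by unfold Pre_count_reconnaissance_units; infer_instance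

def pvWitness_count_reconnaissance_units : Int × Int × List Int := (3, 2, [5, 1, 4])

def Spec_count_reconnaissance_units (n : Int) (d : Int) (heights : List Int) (out : Int) : Prop := out = count_reconnaissance_units_alt n d heights
instance (n : Int) (d : Int) (heights : List Int) (out : Int) : Decidable (Spec_count_reconnaissance_units n d heights out) := by unfold Spec_count_reconnaissance_units; infer_instance

-- ===== CLAIM (what is proved, stated in full; the proofs are below) =====
def Claim_equal_count_reconnaissance_units : Prop := ∀ (n : Int) (d : Int) (heights : List Int), Dom_count_reconnaissance_units n d heights → Pre_count_reconnaissance_units n d heights → Spec_count_reconnaissance_units n d heights (count_reconnaissance_units n d heights)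

-- ===== LEMMAS AND PROOFS =====

-- pvInnerA over range(a, n) returns c + (m - a) when the break condition splits at m.
lemma pvInnerA_split (s : List Int) (d si c a n m : Int)
    (h1 : a ≤ m) (h2 : m ≤ n)
    (hle : ∀ j, a ≤ j → j < m → PySem.List.pyGetD s j 0 - si ≤ d)
    (hgt : ∀ j, m ≤ j → j < n → ¬ (PySem.List.pyGetD s j 0 - si ≤ d)) :
    pvInnerA s d si c (PySem.List.pyRange a n 1) = c + (m - a) := by
  by_cases hna : n ≤ a
  · have hma : m = a := le_antisymm (le_trans h2 hna) h1
    rw [PySem.List.pyRange_one_eq_nil hna]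
    simp [pvInnerA, hma]
  · rw [not_le] at hna
    rw [PySem.List.pyRange_one_cons hna]
    by_cases ham : a < m
    · have hcond : PySem.List.pyGetD s a 0 - si ≤ d := hle a le_rfl ham
      have : pvInnerA s d si (c + 1) (PySem.List.pyRange (a + 1) n 1) = (c + 1) + (m - (a + 1)) := by
        apply pvInnerA_split s d si (c + 1) (a + 1) n m (by omega) h2
        · intro j hj1 hj2; exact hle j (by omega) hj2
        · exact hgt
      simp only [pvInnerA, if_pos hcond, this]; ring
    · have hma : m = a := by omega
      have hcond : ¬ (PySem.List.pyGetD s a 0 - si ≤ d) := hgt a (by omega) hna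
      simp only [pvInnerA, if_neg hcond]; omega
termination_by (n - a).toNat
decreasing_by omega

-- the per-soldier step of A equals the per-soldier step of B
lemma pvStep_eq (s : List Int) (d : Int) (n i c : Int)
    (hs : List.Pairwise (· ≤ ·) s)
    (hi0 : 0 ≤ i) (hin : i < n) (hn : n ≤ (s.length : Int)) :
    pvInnerA s d (PySem.List.pyGetD s i 0) c (PySem.List.pyRange (i + 1) n 1)
      = c + (pvBisectRightWin s ((PySem.List.pyGetD s i 0) + d) (i + 1) n - (i + 1)) := by
  set x : Int := PySem.List.pyGetD s i 0 + d with hx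
  set t : List Int := PySem.List.slice s (some (i + 1)) (some n) with ht
  have htdef : t = (s.drop (i + 1).toNat).take (n.toNat - (i + 1).toNat) :=
    PySem.List.slice_toNat s (by omega) (by omega)
  have hts : t.Sublist s := by
    rw [htdef]; exact (List.take_sublist _ _).trans (List.drop_sublist _ _)
  have htsorted : List.Pairwise (· ≤ ·) t := hs.sublist hts
  have htlen : t.length = n.toNat - (i + 1).toNat := by
    rw [htdef]; simp; omega
  have htget : ∀ (k : Nat) (hk : k < t.length), t[k] = PySem.List.pyGetD s ((i + 1) + k) 0 := by
    intro k hk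
    have hk' : (i + 1).toNat + k < s.length := by omega
    have : t[k] = s[(i + 1).toNat + k] := by
      simp only [htdef] at hk ⊢
      rw [List.getElem_take, List.getElem_drop]
    rw [this, PySem.List.pyGetD_eq_getElem s 0 (by omega) (by omega)]
    congr 1; omega
  obtain ⟨hr1, hr2, hr3⟩ := PySem.List.bisectRight_spec t x htsorted
  set r : Nat := PySem.List.bisectRight t x with hrdef
  have hwin : pvBisectRightWin s x (i + 1) n = (i + 1) + (r : Int) := by
    simp [pvBisectRightWin, ← ht, ← hrdef]
  rw [hwin]
  have hmain : pvInnerA s d (PySem.List.pyGetD s i 0) c (PySem.List.pyRange (i + 1) n 1)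
      = c + (((i + 1) + (r : Int)) - (i + 1)) := by
    apply pvInnerA_split s d _ c (i + 1) n ((i + 1) + (r : Int)) (by omega) (by omega)
    · intro j hj1 hj2
      have hk : (j - (i + 1)).toNat < r := by omega
      have hkt : (j - (i + 1)).toNat < t.length := by omega
      have := hr2 (j - (i + 1)).toNat hkt hk
      rw [htget _ hkt] at this
      have hj' : (i + 1) + ((j - (i + 1)).toNat : Int) = j := by omega
      rw [hj'] at this; omega
    · intro j hj1 hj2
      have hkt : (j - (i + 1)).toNat < t.length := by omega
      have hk : r ≤ (j - (i + 1)).toNat := by omega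
      have := hr3 (j - (i + 1)).toNat hkt hk
      rw [htget _ hkt] at this
      have hj' : (i + 1) + ((j - (i + 1)).toNat : Int) = j := by omega
      rw [hj'] at this; omega
  rw [hmain]

-- ===== VERDICT (by name: the statement is the Claim_ definition above) =====
theorem count_reconnaissance_units_spec : Claim_equal_count_reconnaissance_units := by
  intro n d heights _ hpre
  unfold Spec_count_reconnaissance_units count_reconnaissance_units count_reconnaissance_units_alt
  rcases hpre with hpre | hpre
  · set s := PySem.List.sorted heights id with hsdef
    have hslen : (s.length : Int) = (heights.length : Int) := by
      rw [hsdef, PySem.List.length_sorted]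
    have hsorted : List.Pairwise (· ≤ ·) s := PySem.List.sorted_pairwise heights id
    have hfold := PySem.List.foldl_congr_mem (PySem.List.pyRange 0 n 1)
      (fun c i => pvInnerA s d (PySem.List.pyGetD s i 0) c (PySem.List.pyRange (i + 1) n 1))
      (fun c i => c + (pvBisectRightWin s ((PySem.List.pyGetD s i 0) + d) (i + 1) n - (i + 1)))
      0
      (by
        intro c i hi
        rw [PySem.List.mem_pyRange_one] at hi
        exact pvStep_eq s d n i c hsorted hi.1 hi.2 (by omega))
    show (List.foldl
        (fun c i => pvInnerA s d (PySem.List.pyGetD s i 0) c (PySem.List.pyRange (i + 1) n 1)) 0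
        (PySem.List.pyRange 0 n 1)) * 2
      = (List.foldl (fun c i => c + (pvBisectRightWin s (PySem.List.pyGetD s i 0 + d) (i + 1) n - (i + 1))) 0
        (PySem.List.pyRange 0 n 1)) * 2
    rw [hfold]
  · rw [PySem.List.pyRange_one_eq_nil hpre]
    simp
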